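-- pv_equiv track=rewrite | github.com/apriljgranzow/advent-of-code-2017 | 4/solution.py | no_dupe_words
-- ===== SOURCE A (Python) =====
-- def no_dupe_words(string):
--     words = set()
--     for word in string.split():
--         if word in words:
--             return False
--         else:
--             words.add(word)
--     return True
-- ===== SOURCE B (Python) =====
-- def no_dupe_words(string):
--     words = string.split()
--     return len(words) == len(set(words))
-- ===== Notes on version B (the rewrite author's own statement) =====
-- stated objective: idiomatic
-- what changed: Replaces the explicit seen-set loop with early return by a single count comparison: len(words) == len(set(words)).
import Mathlib
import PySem

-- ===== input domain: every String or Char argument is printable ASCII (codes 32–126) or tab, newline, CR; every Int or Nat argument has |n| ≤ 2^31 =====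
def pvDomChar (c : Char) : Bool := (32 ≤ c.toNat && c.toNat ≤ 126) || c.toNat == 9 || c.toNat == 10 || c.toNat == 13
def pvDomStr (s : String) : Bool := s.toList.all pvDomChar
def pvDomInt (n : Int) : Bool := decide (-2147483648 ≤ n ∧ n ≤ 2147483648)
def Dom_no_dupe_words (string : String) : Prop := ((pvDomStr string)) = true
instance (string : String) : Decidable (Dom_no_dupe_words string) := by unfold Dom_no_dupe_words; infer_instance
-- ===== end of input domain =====

-- B replaces A's seen-set loop with early return by the idiomatic count comparison len(words) == len(set(words)).

-- ===== PORT A =====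
-- the 'for word in string.split(): if word in words: return False else: words.add(word)' loop
def noDupeLoopA : List String → PySem.Set String → Bool
  | [], _ => true
  | w :: ws, seen =>
      if PySem.Set.contains seen w then false
      else noDupeLoopA ws (PySem.Set.add seen w)

def no_dupe_words (string : String) : Bool :=
  noDupeLoopA (PySem.Str.split₀ string) PySem.Set.empty

-- ===== PORT B =====
def no_dupe_words_alt (string : String) : Bool :=
  let words := PySem.Str.split₀ string
  decide (words.length = (PySem.Set.ofList words).length)

-- ===== PRECONDITION & SPEC =====
def Spec_no_dupe_words (string : String) (out : Bool) : Prop := out = no_dupe_words_alt string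
instance (string : String) (out : Bool) : Decidable (Spec_no_dupe_words string out) := by unfold Spec_no_dupe_words; infer_instance

-- ===== CLAIM (what is proved, stated in full; the proofs are below) =====
def Claim_equal_no_dupe_words : Prop := ∀ (string : String), Dom_no_dupe_words string → Spec_no_dupe_words string (no_dupe_words string)

-- ===== LEMMAS AND PROOFS =====

theorem length_add_le (s : PySem.Set String) (x : String) :
    (PySem.Set.add s x).length ≤ s.length + 1 := by
  unfold PySem.Set.add
  split <;> simp

theorem length_foldl_add_le (ws : List String) (seen : PySem.Set String) :
    (ws.foldl PySem.Set.add seen).length ≤ seen.length + ws.length := by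
  induction ws generalizing seen with
  | nil => simp
  | cons w ws ih =>
      simp only [List.foldl_cons]
      calc (ws.foldl PySem.Set.add (PySem.Set.add seen w)).length
          ≤ (PySem.Set.add seen w).length + ws.length := ih _
        _ ≤ seen.length + 1 + ws.length := by
              have := length_add_le seen w; omega
        _ = seen.length + (w :: ws).length := by simp; omega

theorem loopA_eq_decide (ws : List String) (seen : PySem.Set String) :
    noDupeLoopA ws seen =
      decide ((ws.foldl PySem.Set.add seen).length = seen.length + ws.length) := by
  induction ws generalizing seen with
  | nil => simp [noDupeLoopA]
  | cons w ws ih =>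
      by_cases h : PySem.Set.contains seen w = true
      · have hadd : PySem.Set.add seen w = seen := by
          unfold PySem.Set.add; exact if_pos h
        have hle : (ws.foldl PySem.Set.add seen).length ≤ seen.length + ws.length :=
          length_foldl_add_le ws seen
        simp only [noDupeLoopA, h, if_true, List.foldl_cons, hadd, List.length_cons]
        have : ¬ ((ws.foldl PySem.Set.add seen).length = seen.length + (ws.length + 1)) := by
          omega
        simp [this]
      · have hadd : PySem.Set.add seen w = seen ++ [w] := by
          unfold PySem.Set.add; exact if_neg h
        simp only [noDupeLoopA, h, List.foldl_cons, ih, hadd]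
        simp only [Bool.false_eq_true, if_false]
        rw [decide_eq_decide]
        simp only [List.length_append, List.length_cons, List.length_nil]
        omega

-- ===== VERDICT (by name: the statement is the Claim_ definition above) =====
theorem no_dupe_words_spec : Claim_equal_no_dupe_words := by
  intro s _
  show noDupeLoopA (PySem.Str.split₀ s) PySem.Set.empty =
    decide ((PySem.Str.split₀ s).length = (PySem.Set.ofList (PySem.Str.split₀ s)).length)
  rw [loopA_eq_decide, PySem.Set.ofList_eq_foldl, decide_eq_decide]
  simp only [PySem.Set.empty, List.length_nil, Nat.zero_add, eq_comm]
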